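-- pv_equiv track=rewrite | github.com/LL-SS/algorithm | 프로그래머스/lv0/120956. 옹알이 （1）/옹알이 （1）.py | solution
-- ===== SOURCE A (Python) =====
-- def solution(babbling):
--     answer = 0
--
--     for string in babbling:
--         while is_pronounceable(string):
--             string = string[len(is_pronounceable(string)):]
--
--         if len(string) == 0:
--             answer += 1
--
--     return answer
--
-- def is_pronounceable(string):
--     baby = ['aya', 'ye', 'woo', 'ma']
--
--     for word in baby:
--         if string.find(word) == 0:
--             return word
--
--     return False
-- ===== SOURCE B (Python) =====
-- def solution(babbling):
--     WORDS = ('aya', 'ye', 'woo', 'ma')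
--     count = 0
--     for s in babbling:
--         # backward word-break DP: dp[j] says whether the suffix of s starting
--         # j characters into the current suffix `suf` is decomposable.
--         dp = [True]
--         suf = ''
--         for ch in reversed(s):
--             suf = ch + suf
--             ok = any(suf.startswith(w) and dp[len(w) - 1] for w in WORDS)
--             dp = [ok] + dp
--         count += dp[0]
--     return count
-- ===== Notes on version B (the rewrite author's own statement) =====
-- stated objective: alternative
-- what changed: Replaces A's greedy front-stripping while-loop (repeated find/slice until no baby word is a prefix) with a backward word-break dynamic-programming table per string: dp[i] records whether the suffix starting at i is decomposable, built in one right-to-left pass; the counter adds dp[0].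
import Mathlib
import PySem

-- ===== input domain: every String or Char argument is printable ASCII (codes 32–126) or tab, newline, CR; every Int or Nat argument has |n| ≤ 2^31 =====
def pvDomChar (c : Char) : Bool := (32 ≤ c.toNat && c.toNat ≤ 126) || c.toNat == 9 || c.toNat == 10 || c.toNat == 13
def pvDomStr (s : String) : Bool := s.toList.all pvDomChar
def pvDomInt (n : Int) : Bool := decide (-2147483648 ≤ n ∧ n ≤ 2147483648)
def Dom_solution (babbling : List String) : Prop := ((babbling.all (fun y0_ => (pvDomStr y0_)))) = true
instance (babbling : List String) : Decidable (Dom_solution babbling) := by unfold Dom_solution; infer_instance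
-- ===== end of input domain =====

-- B replaces A's greedy front-stripping loop with a backward word-break DP table per
-- string (objective: alternative algorithm of similar cost; return values provably equal).

-- ===== PORT A =====
-- baby = ['aya', 'ye', 'woo', 'ma']
def babyWords : List String := ["aya", "ye", "woo", "ma"]

-- for word in baby: if string.find(word) == 0: return word;  return False
-- (returning a word → some word, returning False → none)
def isPronounceable (string : String) : Option String :=
  babyWords.findSome? (fun word => if PySem.Str.find string word = 0 then some word else none)

-- used by the ports' proofs and by the while-loop's termination proof below
theorem find_zero_iff (l sub : List Char) : PySem.Chars.find l sub = 0 ↔ sub <+: l := by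
  constructor
  · intro h
    have := (PySem.Chars.find_spec (s := l) (sub := sub)
      (by omega : (0:Int) ≤ PySem.Chars.find l sub)).1
    simpa [h] using this
  · intro h
    have hne : PySem.Chars.find l sub ≠ -1 :=
      (PySem.Chars.find_ne_neg_one_iff l sub).mpr h.isInfix
    have hge : 0 ≤ PySem.Chars.find l sub := by
      have := PySem.Chars.neg_one_le_find l sub; omega
    have hsp := PySem.Chars.find_spec (s := l) (sub := sub) hge
    by_contra hne0
    have h0 : 0 < (PySem.Chars.find l sub).toNat := by omega
    exact hsp.2 0 h0 (by simpa using h)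

theorem shrink_of_find (s w : String) (hw : 0 < w.toList.length)
    (h : PySem.Chars.find s.toList w.toList = 0) :
    (PySem.Str.slice s (some (PySem.Str.len w)) none).toList.length < s.toList.length := by
  have hl := ((find_zero_iff _ _).mp h).length_le
  simp [PySem.Str.len, PySem.Str.toList_slice, PySem.Chars.slice_eq_listSlice,
    PySem.List.slice_from_natCast]
  have e1 : s.toList.length = s.length := String.length_toList ..
  have e2 : w.toList.length = w.length := String.length_toList ..
  omega

theorem isPronounceable_shrinks (s w : String) (h : isPronounceable s = some w) :
    (PySem.Str.slice s (some (PySem.Str.len w)) none).toList.length < s.toList.length := by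
  unfold isPronounceable babyWords at h
  by_cases c1 : PySem.Chars.find s.toList ['a','y','a'] = 0
  · simp [List.findSome?, c1] at h; subst h; exact shrink_of_find _ _ (by decide) (by simpa using c1)
  · by_cases c2 : PySem.Chars.find s.toList ['y','e'] = 0
    · simp [List.findSome?, c1, c2] at h; subst h; exact shrink_of_find _ _ (by decide) (by simpa using c2)
    · by_cases c3 : PySem.Chars.find s.toList ['w','o','o'] = 0
      · simp [List.findSome?, c1, c2, c3] at h; subst h; exact shrink_of_find _ _ (by decide) (by simpa using c3)
      · by_cases c4 : PySem.Chars.find s.toList ['m','a'] = 0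
        · simp [List.findSome?, c1, c2, c3, c4] at h; subst h
          exact shrink_of_find _ _ (by decide) (by simpa using c4)
        · simp [List.findSome?, c1, c2, c3, c4] at h

-- while is_pronounceable(string): string = string[len(is_pronounceable(string)):]
-- (the two calls per iteration return the same word; here it is computed once)
def stripLoop (string : String) : String :=
  match h : isPronounceable string with
  | some word => stripLoop (PySem.Str.slice string (some (PySem.Str.len word)) none)
  | none => string
termination_by string.toList.length
decreasing_by exact isPronounceable_shrinks _ _ h

def solution (babbling : List String) : Int :=
  babbling.foldl (fun answer string =>
    if PySem.Str.len (stripLoop string) = 0 then answer + 1 else answer) 0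

-- ===== PORT B =====
-- WORDS = ('aya', 'ye', 'woo', 'ma'), as code-point lists (strings are List Char here)
def wordsB : List (List Char) := [['a','y','a'], ['y','e'], ['w','o','o'], ['m','a']]

-- one iteration of Source B's inner loop: suf = ch + suf;
-- ok = any(suf.startswith(w) and dp[len(w)-1] for w in WORDS); dp = [ok] + dp
-- (dp[len(w)-1] is ported as getD: whenever it is evaluated, the startswith
-- conjunct already guarantees len(w)-1 < len(dp), so getD is exact here)
def dpStep (st : List Bool × List Char) (ch : Char) : List Bool × List Char :=
  let suf := ch :: st.2
  let ok := wordsB.any (fun w => w.isPrefixOf suf && st.1.getD (w.length - 1) false)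
  (ok :: st.1, suf)

def solution_alt (babbling : List String) : Int :=
  babbling.foldl (fun count s =>
    count + (if ((s.toList.reverse.foldl dpStep ([true], [])).1.getD 0 false) then 1 else 0)) 0

-- ===== PRECONDITION & SPEC =====
def Spec_solution (babbling : List String) (out : Int) : Prop := out = solution_alt babbling
instance (babbling : List String) (out : Int) : Decidable (Spec_solution babbling out) := by unfold Spec_solution; infer_instance

-- ===== CLAIM (what is proved, stated in full; the proofs are below) =====
def Claim_equal_solution : Prop := ∀ (babbling : List String), Dom_solution babbling → Spec_solution babbling (solution babbling)

-- ===== LEMMAS AND PROOFS =====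

-- 'the string is decomposable': the mathematical yardstick both ports are compared to
def good (l : List Char) : Bool :=
  if ['a','y','a'].isPrefixOf l then good (l.drop 3)
  else if ['y','e'].isPrefixOf l then good (l.drop 2)
  else if ['w','o','o'].isPrefixOf l then good (l.drop 3)
  else if ['m','a'].isPrefixOf l then good (l.drop 2)
  else l.isEmpty
termination_by l.length
decreasing_by
  all_goals (rename_i h; have := (List.isPrefixOf_iff_prefix.mp h).length_le; simp at this ⊢; omega)

theorem isPron_eq (s : String) : isPronounceable s =
    (if ['a','y','a'] <+: s.toList then some "aya"
     else if ['y','e'] <+: s.toList then some "ye"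
     else if ['w','o','o'] <+: s.toList then some "woo"
     else if ['m','a'] <+: s.toList then some "ma"
     else none) := by
  unfold isPronounceable babyWords
  simp only [List.findSome?, PySem.Str.find_eq, find_zero_iff]
  rw [show ("aya".toList) = ['a','y','a'] from by decide, show ("ye".toList) = ['y','e'] from by decide,
     show ("woo".toList) = ['w','o','o'] from by decide, show ("ma".toList) = ['m','a'] from by decide]
  split_ifs <;> rfl

theorem good_nil : good [] = true := by
  rw [good]; norm_num [List.isPrefixOf]

theorem tails_map_getD (suf : List Char) (k : Nat) (hk : k ≤ suf.length) :
    ((List.tails suf).map good).getD k false = good (suf.drop k) := by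
  have hlen : k < (List.tails suf).length := by simp [List.length_tails]; omega
  rw [List.getD_eq_getElem?_getD, List.getElem?_map, List.getElem?_eq_getElem hlen,
    List.getElem_tails]
  rfl

theorem ok_eq_good (c : Char) (suf : List Char) :
    (wordsB.any (fun w => w.isPrefixOf (c :: suf) && ((List.tails suf).map good).getD (w.length - 1) false)) = good (c :: suf) := by
  rw [good]
  simp only [wordsB, List.any_cons, List.any_nil, Bool.or_false, List.isPrefixOf,
    List.length_cons, List.length_nil]
  by_cases hc1 : c = 'a'
  · subst hc1
    by_cases h : ['y','a'].isPrefixOf suf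
    · have hl := (List.isPrefixOf_iff_prefix.mp h).length_le
      simp at hl
      rw [tails_map_getD suf 2 (by omega)]
      simp [h]
    · simp [h]
  · by_cases hc2 : c = 'y'
    · subst hc2
      by_cases h : ['e'].isPrefixOf suf
      · have hl := (List.isPrefixOf_iff_prefix.mp h).length_le
        simp at hl
        rw [tails_map_getD suf 1 (by omega)]
        simp [h]
      · simp [h]
    · by_cases hc3 : c = 'w'
      · subst hc3
        by_cases h : ['o','o'].isPrefixOf suf
        · have hl := (List.isPrefixOf_iff_prefix.mp h).length_le
          simp at hl
          rw [tails_map_getD suf 2 (by omega)]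
          simp [h]
        · simp [h]
      · by_cases hc4 : c = 'm'
        · subst hc4
          by_cases h : ['a'].isPrefixOf suf
          · have hl := (List.isPrefixOf_iff_prefix.mp h).length_le
            simp at hl
            rw [tails_map_getD suf 1 (by omega)]
            simp [h]
          · simp [h]
        · have e1 : ('a' == c) = false := beq_eq_false_iff_ne.mpr (fun h => hc1 h.symm)
          have e2 : ('y' == c) = false := beq_eq_false_iff_ne.mpr (fun h => hc2 h.symm)
          have e3 : ('w' == c) = false := beq_eq_false_iff_ne.mpr (fun h => hc3 h.symm)
          have e4 : ('m' == c) = false := beq_eq_false_iff_ne.mpr (fun h => hc4 h.symm)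
          simp [e1, e2, e3, e4]

theorem dpInv (r : List Char) : ∀ (suf : List Char) (dp : List Bool), dp = (List.tails suf).map good →
    r.foldl dpStep (dp, suf) = ((List.tails (r.reverse ++ suf)).map good, r.reverse ++ suf) := by
  induction r with
  | nil => intro suf dp h; simp [h]
  | cons c r' ih =>
      intro suf dp h
      have hstep : dpStep (dp, suf) c = (good (c :: suf) :: dp, c :: suf) := by
        unfold dpStep
        simp only [h]
        rw [ok_eq_good]
      rw [List.foldl_cons, hstep,
        ih (c :: suf) _ (by rw [List.tails_cons, List.map_cons, h])]
      simp

theorem stripGood (s : String) : ((stripLoop s).toList = []) ↔ good s.toList = true := by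
  induction s using stripLoop.induct with
  | case1 s w h ih =>
      rw [stripLoop.eq_def, h]
      rw [isPron_eq] at h
      rw [ih]
      split_ifs at h with hp1 hp2 hp3 hp4
      · cases h
        have ht : (PySem.Str.slice s (some (PySem.Str.len "aya")) none).toList = s.toList.drop 3 := by
          simp [PySem.Str.toList_slice, PySem.Chars.slice_eq_listSlice, PySem.Str.len]
          rw [show ((3:Int)) = ((3:Nat):Int) from by norm_num, PySem.List.slice_from_natCast]
        rw [ht]
        conv_rhs => rw [good]
        rw [if_pos (List.isPrefixOf_iff_prefix.mpr hp1)]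
      · cases h
        have ht : (PySem.Str.slice s (some (PySem.Str.len "ye")) none).toList = s.toList.drop 2 := by
          simp [PySem.Str.toList_slice, PySem.Chars.slice_eq_listSlice, PySem.Str.len]
          rw [show ((2:Int)) = ((2:Nat):Int) from by norm_num, PySem.List.slice_from_natCast]
        rw [ht]
        conv_rhs => rw [good]
        rw [if_neg (fun hb => hp1 (List.isPrefixOf_iff_prefix.mp hb)),
          if_pos (List.isPrefixOf_iff_prefix.mpr hp2)]
      · cases h
        have ht : (PySem.Str.slice s (some (PySem.Str.len "woo")) none).toList = s.toList.drop 3 := by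
          simp [PySem.Str.toList_slice, PySem.Chars.slice_eq_listSlice, PySem.Str.len]
          rw [show ((3:Int)) = ((3:Nat):Int) from by norm_num, PySem.List.slice_from_natCast]
        rw [ht]
        conv_rhs => rw [good]
        rw [if_neg (fun hb => hp1 (List.isPrefixOf_iff_prefix.mp hb)),
          if_neg (fun hb => hp2 (List.isPrefixOf_iff_prefix.mp hb)),
          if_pos (List.isPrefixOf_iff_prefix.mpr hp3)]
      · cases h
        have ht : (PySem.Str.slice s (some (PySem.Str.len "ma")) none).toList = s.toList.drop 2 := by
          simp [PySem.Str.toList_slice, PySem.Chars.slice_eq_listSlice, PySem.Str.len]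
          rw [show ((2:Int)) = ((2:Nat):Int) from by norm_num, PySem.List.slice_from_natCast]
        rw [ht]
        conv_rhs => rw [good]
        rw [if_neg (fun hb => hp1 (List.isPrefixOf_iff_prefix.mp hb)),
          if_neg (fun hb => hp2 (List.isPrefixOf_iff_prefix.mp hb)),
          if_neg (fun hb => hp3 (List.isPrefixOf_iff_prefix.mp hb)),
          if_pos (List.isPrefixOf_iff_prefix.mpr hp4)]
  | case2 s h =>
      rw [stripLoop.eq_def, h]
      rw [isPron_eq] at h
      split_ifs at h with hp1 hp2 hp3 hp4
      rw [good, if_neg (fun hb => hp1 (List.isPrefixOf_iff_prefix.mp hb)),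
        if_neg (fun hb => hp2 (List.isPrefixOf_iff_prefix.mp hb)),
        if_neg (fun hb => hp3 (List.isPrefixOf_iff_prefix.mp hb)),
        if_neg (fun hb => hp4 (List.isPrefixOf_iff_prefix.mp hb))]
      simp [List.isEmpty_iff]

theorem perString (s : String) :
    (PySem.Str.len (stripLoop s) = 0) ↔ ((s.toList.reverse.foldl dpStep ([true], [])).1.getD 0 false = true) := by
  have hdp := dpInv s.toList.reverse [] [true] (by simp [good_nil])
  rw [List.reverse_reverse, List.append_nil] at hdp
  rw [hdp]
  simp only []
  rw [tails_map_getD s.toList 0 (Nat.zero_le _), List.drop_zero]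
  rw [← stripGood]
  rw [PySem.Str.len_eq]
  constructor
  · intro h
    have : (stripLoop s).length = 0 := by exact_mod_cast h
    rw [← String.length_toList] at this
    exact List.length_eq_zero_iff.mp this
  · intro h
    have : (stripLoop s).toList.length = 0 := by rw [h]; rfl
    rw [String.length_toList] at this
    exact_mod_cast this

-- ===== VERDICT (by name: the statement is the Claim_ definition above) =====
theorem solution_spec : Claim_equal_solution := by
  intro babbling hD
  clear hD
  unfold Spec_solution solution solution_alt
  induction babbling using List.reverseRecOn with
  | nil => rfl
  | append_singleton xs x ih =>
      simp only [List.foldl_append, List.foldl_cons, List.foldl_nil, ih]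
      by_cases h : PySem.Str.len (stripLoop x) = 0
      · rw [if_pos h, if_pos ((perString x).mp h)]
      · rw [if_neg h, if_neg (fun hc => h ((perString x).mpr hc))]; simp
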